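-- pv_equiv track=rewrite | github.com/AxJar/Python-Basics | Python/1/Archivos/Tarea_No_7.py | cali_baja
-- ===== SOURCE A (Python) =====
-- def cali_baja(cf):
--     baja = 100
--     nombre = ""
--     for elemento in cf:
--         if baja > elemento[2]:
--             baja = elemento[2]
--             nombre = elemento[1]
--     return nombre
-- ===== SOURCE B (Python) =====
-- def cali_baja(cf):
--     orden = sorted(cf, key=lambda e: e[2])
--     if not orden or orden[0][2] >= 100:
--         return ""
--     return orden[0][1]
-- ===== Notes on version B (the rewrite author's own statement) =====
-- stated objective: alternative
-- what changed: replaces the guarded running-minimum scan with a stable sort by grade followed by inspecting the head element (empty list or head grade >= 100 gives "")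
import Mathlib
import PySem

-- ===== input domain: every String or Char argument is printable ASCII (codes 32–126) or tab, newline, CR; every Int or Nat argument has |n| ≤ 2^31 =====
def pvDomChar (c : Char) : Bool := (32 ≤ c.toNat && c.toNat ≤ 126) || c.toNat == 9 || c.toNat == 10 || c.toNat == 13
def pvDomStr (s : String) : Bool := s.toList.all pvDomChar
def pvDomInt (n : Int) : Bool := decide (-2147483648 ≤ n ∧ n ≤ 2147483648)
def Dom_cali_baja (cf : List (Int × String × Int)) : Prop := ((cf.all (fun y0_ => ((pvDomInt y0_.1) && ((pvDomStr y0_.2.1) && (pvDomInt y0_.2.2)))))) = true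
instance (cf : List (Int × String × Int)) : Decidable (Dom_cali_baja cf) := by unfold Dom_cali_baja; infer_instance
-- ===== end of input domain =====

-- B replaces A's guarded running-minimum scan with a stable sort by grade and a look at the head (alternative decomposition, not faster).


-- ===== PORT A =====
def cali_baja (cf : List (Int × String × Int)) : String :=
  (cf.foldl (fun (s : Int × String) e => if s.1 > e.2.2 then (e.2.2, e.2.1) else s)
    ((100 : Int), "")).2

-- ===== PORT B =====
def cali_baja_alt (cf : List (Int × String × Int)) : String :=
  let orden := PySem.List.sorted cf (fun e => e.2.2) false
  match orden with
  | [] => ""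
  | m :: _ => if m.2.2 ≥ 100 then "" else m.2.1

-- ===== PRECONDITION & SPEC =====
def Spec_cali_baja (cf : List (Int × String × Int)) (out : String) : Prop := out = cali_baja_alt cf
instance (cf : List (Int × String × Int)) (out : String) : Decidable (Spec_cali_baja cf out) := by unfold Spec_cali_baja; infer_instance

-- ===== CLAIM (what is proved, stated in full; the proofs are below) =====
def Claim_equal_cali_baja : Prop := ∀ (cf : List (Int × String × Int)), Dom_cali_baja cf → Spec_cali_baja cf (cali_baja cf)

-- ===== LEMMAS AND PROOFS =====

-- one step of the min?-fold, named so the proofs can rewrite with it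
def pvStepB (o : Option (Int × String × Int)) (x : Int × String × Int) :
    Option (Int × String × Int) :=
  match o with
  | none => some x
  | some m => if x.2.2 < m.2.2 then some x else some m

-- head of an insertBy step mirrors one pvStepB step
theorem pv_head_insertBy (x : Int × String × Int) (ys : List (Int × String × Int)) :
    (PySem.List.insertBy (fun a b => decide (a.2.2 < b.2.2)) x ys).head? =
      pvStepB ys.head? x := by
  cases ys with
  | nil => simp [PySem.List.insertBy, pvStepB]
  | cons y ys =>
    simp only [PySem.List.insertBy, List.head?, pvStepB]
    by_cases h : x.2.2 < y.2.2 <;> simp [h]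

-- head of the insertion-sort fold is the pvStepB fold
theorem pv_head_foldl_insertBy (xs acc : List (Int × String × Int)) :
    (xs.foldl (fun acc x => PySem.List.insertBy (fun a b => decide (a.2.2 < b.2.2)) x acc) acc).head? =
      xs.foldl pvStepB acc.head? := by
  induction xs generalizing acc with
  | nil => rfl
  | cons x xs ih =>
    simp only [List.foldl_cons]
    rw [ih, pv_head_insertBy]

theorem pv_head_sorted (cf : List (Int × String × Int)) :
    (PySem.List.sorted cf (fun e => e.2.2) false).head? = cf.foldl pvStepB none := by
  rw [PySem.List.sorted_eq_foldl_insertBy]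
  exact pv_head_foldl_insertBy cf []

-- the state invariant tying A's (baja, nombre) pair to the min?-fold option state
def pvRel (b : Int) (n : String) (o : Option (Int × String × Int)) : Prop :=
  (o = none ∧ b = 100 ∧ n = "") ∨
  (∃ m, o = some m ∧ ((m.2.2 < 100 ∧ b = m.2.2 ∧ n = m.2.1) ∨ (100 ≤ m.2.2 ∧ b = 100 ∧ n = "")))

theorem pv_main (cf : List (Int × String × Int)) :
    ∀ (b : Int) (n : String) (o : Option (Int × String × Int)), pvRel b n o →
    (cf.foldl (fun (s : Int × String) e => if s.1 > e.2.2 then (e.2.2, e.2.1) else s) (b, n)).2 =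
      (match cf.foldl pvStepB o with
       | none => ""
       | some m => if m.2.2 ≥ 100 then "" else m.2.1) := by
  induction cf with
  | nil =>
    intro b n o h
    rcases h with ⟨ho, hb, hn⟩ | ⟨m, ho, ⟨h1, hb, hn⟩ | ⟨h1, hb, hn⟩⟩ <;>
      subst ho <;> simp_all [List.foldl_nil]
  | cons x rest ih =>
    intro b n o h
    simp only [List.foldl_cons]
    rcases h with ⟨ho, hb, hn⟩ | ⟨m, ho, ⟨h1, hb, hn⟩ | ⟨h1, hb, hn⟩⟩ <;> subst ho <;> subst hb <;> subst hn
    · by_cases hx : (100 : Int) > x.2.2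
      · have e2 : pvStepB none x = some x := rfl
        rw [if_pos hx, e2]
        exact ih _ _ _ (Or.inr ⟨x, rfl, Or.inl ⟨hx, rfl, rfl⟩⟩)
      · have e2 : pvStepB none x = some x := rfl
        rw [if_neg hx, e2]
        exact ih _ _ _ (Or.inr ⟨x, rfl, Or.inr ⟨by omega, rfl, rfl⟩⟩)
    · -- current best m with m.2.2 < 100
      by_cases hlt : x.2.2 < m.2.2
      · have e2 : pvStepB (some m) x = some x := if_pos hlt
        rw [if_pos hlt, e2]
        exact ih _ _ _ (Or.inr ⟨x, rfl, Or.inl ⟨by omega, rfl, rfl⟩⟩)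
      · have e2 : pvStepB (some m) x = some m := if_neg hlt
        rw [if_neg hlt, e2]
        exact ih _ _ _ (Or.inr ⟨m, rfl, Or.inl ⟨h1, rfl, rfl⟩⟩)
    · -- current best m with 100 ≤ m.2.2; A's state is still the sentinel
      by_cases hx : (100 : Int) > x.2.2
      · have e2 : pvStepB (some m) x = some x := if_pos (by omega)
        rw [if_pos hx, e2]
        exact ih _ _ _ (Or.inr ⟨x, rfl, Or.inl ⟨hx, rfl, rfl⟩⟩)
      · by_cases hlt : x.2.2 < m.2.2
        · have e2 : pvStepB (some m) x = some x := if_pos hlt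
          rw [if_neg hx, e2]
          exact ih _ _ _ (Or.inr ⟨x, rfl, Or.inr ⟨by omega, rfl, rfl⟩⟩)
        · have e2 : pvStepB (some m) x = some m := if_neg hlt
          rw [if_neg hx, e2]
          exact ih _ _ _ (Or.inr ⟨m, rfl, Or.inr ⟨h1, rfl, rfl⟩⟩)

-- ===== VERDICT (by name: the statement is the Claim_ definition above) =====
theorem cali_baja_spec : Claim_equal_cali_baja := by
  intro cf _
  unfold Spec_cali_baja cali_baja cali_baja_alt
  rw [pv_main cf 100 "" none (Or.inl ⟨rfl, rfl, rfl⟩), ← pv_head_sorted cf]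
  cases hs : PySem.List.sorted cf (fun e => e.2.2) false <;> simp
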